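-- pv_equiv track=rewrite | github.com/EronDS/Bioinformatics | BioinformaticsAlgorithms/BioinformaticsII/Week IV/weekIV.py | cyclepeptide
-- ===== SOURCE A (Python) =====
-- def cyclepeptide(peptide):
--     l = len(peptide)
--     ls = []
--     looped = peptide + peptide
--     for start in range(0, l):
--         for length in range(1, l):
--             ls.append((looped[start:start + length]))
--     ls.append(peptide)
--     return ls
-- ===== SOURCE B (Python) =====
-- def cyclepeptide(peptide):
--     l = len(peptide)
--     out = []
--     for start in range(l):
--         rot = peptide[start:] + peptide[:start]
--         acc = ""
--         for ch in rot[:l - 1]: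
--             acc += ch
--             out.append(acc)
--     out.append(peptide)
--     return out
-- ===== Notes on version B (the rewrite author's own statement) =====
-- stated objective: alternative
-- what changed: B drops the doubled-string trick: per start it builds the rotation peptide[start:]+peptide[:start] once and emits its prefixes by accumulating one character at a time, instead of taking l-1 fresh slices out of peptide+peptide.
import Mathlib
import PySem

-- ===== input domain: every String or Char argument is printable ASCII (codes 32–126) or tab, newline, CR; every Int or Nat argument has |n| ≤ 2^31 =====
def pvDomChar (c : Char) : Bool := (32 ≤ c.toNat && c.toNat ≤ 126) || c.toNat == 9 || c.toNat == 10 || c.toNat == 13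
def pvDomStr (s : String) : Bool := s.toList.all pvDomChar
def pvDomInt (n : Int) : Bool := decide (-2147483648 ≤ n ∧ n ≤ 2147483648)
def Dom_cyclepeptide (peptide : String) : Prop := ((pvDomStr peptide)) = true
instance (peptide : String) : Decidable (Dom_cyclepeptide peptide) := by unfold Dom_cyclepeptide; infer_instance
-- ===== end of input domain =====

-- B replaces A's slicing of the doubled string by per-start rotation + incremental prefix accumulation (alternative decomposition, same output).

-- ===== PORT A =====
def cyclepeptide (peptide : String) : List String :=
  let cs := peptide.toList
  let l : Int := PySem.Chars.len cs
  let looped := cs ++ cs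
  let ls :=
    (PySem.List.pyRange 0 l 1).foldl (fun ls start =>
      (PySem.List.pyRange 1 l 1).foldl (fun ls length =>
        ls ++ [String.ofList (PySem.Chars.slice looped (some start) (some (start + length)))]) ls) []
  ls ++ [peptide]

-- ===== PORT B =====
def cyclepeptide_alt (peptide : String) : List String :=
  let cs := peptide.toList
  let l := cs.length
  let out :=
    (List.range l).foldl (fun out start =>
      let rot := cs.drop start ++ cs.take start
      (((rot.take (l - 1)).foldl
          (fun (st : List Char × List String) ch =>
            (st.1 ++ [ch], st.2 ++ [String.ofList (st.1 ++ [ch])]))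
          ([], out)).2)) []
  out ++ [peptide]

-- ===== PRECONDITION & SPEC =====
def Spec_cyclepeptide (peptide : String) (out : List String) : Prop := out = cyclepeptide_alt peptide
instance (peptide : String) (out : List String) : Decidable (Spec_cyclepeptide peptide out) := by unfold Spec_cyclepeptide; infer_instance

-- ===== CLAIM (what is proved, stated in full; the proofs are below) =====
def Claim_equal_cyclepeptide : Prop := ∀ (peptide : String), Dom_cyclepeptide peptide → Spec_cyclepeptide peptide (cyclepeptide peptide)

-- ===== LEMMAS AND PROOFS =====

-- B's inner accumulation loop appends the successive nonempty prefixes of what remains to scan.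
theorem b_inner (ys : List Char) (p : List Char) (out : List String) :
    ((ys.foldl
        (fun (st : List Char × List String) ch =>
          (st.1 ++ [ch], st.2 ++ [String.ofList (st.1 ++ [ch])]))
        (p, out)).2)
      = out ++ (List.range ys.length).map (fun i => String.ofList (p ++ ys.take (i + 1))) := by
  induction ys generalizing p out with
  | nil => simp
  | cons c t ih =>
    simp only [List.foldl_cons, ih, List.length_cons, List.range_succ_eq_map, List.map_cons,
      List.map_map]
    simp [Function.comp_def, List.append_assoc]

-- a length-m slice of the doubled list starting at s is a prefix of the rotation at s (m, s ≤ |cs|)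
theorem slice_rot (cs : List Char) (s m : Nat) (hs : s ≤ cs.length) (hm : m ≤ cs.length) :
    PySem.List.slice (cs ++ cs) (some (s : Int)) (some ((s : Int) + (m : Int)))
      = (cs.drop s ++ cs.take s).take m := by
  rw [PySem.List.slice_natCast_add]
  rw [List.drop_append_of_le_length hs]
  rw [List.take_append, List.take_append, List.take_take]
  congr 1
  have : min (m - (cs.drop s).length) s = m - (cs.drop s).length := by
    simp [List.length_drop]; omega
  rw [this]

theorem cyclepeptide_eq_alt (peptide : String) : cyclepeptide peptide = cyclepeptide_alt peptide := by
  unfold cyclepeptide cyclepeptide_alt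
  simp only [PySem.Chars.len, PySem.Chars.slice_eq_listSlice]
  set cs := peptide.toList with hcs
  set n := cs.length with hn
  congr 1
  rw [show ((n : Int)) = ((n : Nat) : Int) from rfl]
  rw [show PySem.List.pyRange 0 (n : Int) 1 = (List.range n).map (fun k => ((k : Nat) : Int)) by
    rw [PySem.List.pyRange_one]; simp]
  rw [List.foldl_map]
  apply PySem.List.foldl_congr_mem'
  intro s hs acc
  have hsn : s < n := List.mem_range.mp hs
  rw [PySem.List.foldl_append_singleton_eq_map]
  rw [b_inner]
  congr 1
  have hrotlen : (cs.drop s ++ cs.take s).length = n := by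
    simp [List.length_drop, List.length_take]; omega
  rw [List.length_take, hrotlen]
  have hmin : min (n - 1) n = n - 1 := by omega
  rw [hmin]
  rw [PySem.List.pyRange_one]
  have : ((n : Int) - 1).toNat = n - 1 := by omega
  rw [this, List.map_map]
  apply List.map_congr_left
  intro i hi
  have hin : i < n - 1 := List.mem_range.mp hi
  simp only [Function.comp_def, List.nil_append]
  rw [List.take_take, show min (i + 1) (n - 1) = i + 1 by omega]
  congr 1
  rw [show (s : Int) + (1 + (i : Int)) = (s : Int) + ((i + 1 : Nat) : Int) by push_cast; ring]
  exact slice_rot cs s (i + 1) (by omega) (by omega)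

-- ===== VERDICT (by name: the statement is the Claim_ definition above) =====
theorem cyclepeptide_spec : Claim_equal_cyclepeptide := by
  intro peptide _
  exact cyclepeptide_eq_alt peptide
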